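-- pv_equiv track=rewrite | github.com/streamx3/msgpack_manifest | mp_manifest.py | __clear_spaces
-- ===== SOURCE A (Python) =====
-- def __clear_spaces(string):
--     symbols_to_get_rid_of = (' ', '\n', '\t')
--     tmp = ''
--     in_quotes = False
--     for i in range(len(string)):
--         if string[i] == '"':
--             in_quotes = not in_quotes
--         if not in_quotes and string[i] in symbols_to_get_rid_of:
--             continue
--         tmp += string[i]
--     return tmp
-- ===== SOURCE B (Python) =====
-- def __clear_spaces(string):
--     parts = string.split('"')
--     cleaned = [part if i % 2 else ''.join(c for c in part if c not in ' \n\t')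
--                for i, part in enumerate(parts)]
--     return '"'.join(cleaned)
-- ===== Notes on version B (the rewrite author's own statement) =====
-- stated objective: simpler
-- what changed: Replaces the character-by-character loop with an in_quotes toggle by splitting on the double-quote character, whitespace-filtering only the even-indexed (outside-quote) parts, and rejoining; also avoids quadratic string concatenation.
import Mathlib
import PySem

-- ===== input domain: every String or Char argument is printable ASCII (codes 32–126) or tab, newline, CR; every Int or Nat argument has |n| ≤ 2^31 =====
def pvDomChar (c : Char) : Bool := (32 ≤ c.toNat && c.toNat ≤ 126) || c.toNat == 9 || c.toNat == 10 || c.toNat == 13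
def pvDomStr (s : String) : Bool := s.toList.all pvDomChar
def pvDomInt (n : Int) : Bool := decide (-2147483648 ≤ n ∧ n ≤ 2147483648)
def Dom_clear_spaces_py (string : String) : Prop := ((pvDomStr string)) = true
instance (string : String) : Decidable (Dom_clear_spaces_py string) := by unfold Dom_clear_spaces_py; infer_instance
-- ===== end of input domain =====

-- B replaces A's character-by-character in_quotes toggle with split-on-'"' and
-- whitespace filtering of the even-indexed (outside-quote) segments; objective: simpler.

-- ===== PORT A =====
-- A: single pass with an in_quotes flag, appending kept characters to tmp.
def clear_spaces_py (string : String) : String :=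
  let r := string.toList.foldl
    (fun (st : List Char × Bool) c =>
      let in_quotes := if c = '"' then !st.2 else st.2
      if !in_quotes && (c == ' ' || c == '\n' || c == '\t') then (st.1, in_quotes)
      else (st.1 ++ [c], in_quotes))
    ([], false)
  String.ofList r.1

-- ===== PORT B =====
-- B: split on '"', filter whitespace out of even-indexed parts, rejoin with '"'.
def clear_spaces_py_alt (string : String) : String :=
  let parts := PySem.Chars.splitOn string.toList ['"']
  let cleaned := (PySem.List.enumerate parts 0).map
    (fun ip => if PySem.Int.mod ip.1 2 != 0 then ip.2
               else ip.2.filter (fun c => !(c == ' ' || c == '\n' || c == '\t')))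
  String.ofList (PySem.Chars.join ['"'] cleaned)

-- ===== PRECONDITION & SPEC =====
def Spec_clear_spaces_py (string : String) (out : String) : Prop := out = clear_spaces_py_alt string
instance (string : String) (out : String) : Decidable (Spec_clear_spaces_py string out) := by unfold Spec_clear_spaces_py; infer_instance

-- ===== CLAIM (what is proved, stated in full; the proofs are below) =====
def Claim_equal_clear_spaces_py : Prop := ∀ (string : String), Dom_clear_spaces_py string → Spec_clear_spaces_py string (clear_spaces_py string)

-- ===== LEMMAS AND PROOFS =====

-- the three whitespace characters A removes
def pvWs (c : Char) : Bool := c == ' ' || c == '\n' || c == '\t'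

-- direct recursive characterisation of A's loop body output
def pvGo : List Char → Bool → List Char
  | [], _ => []
  | c :: cs, b =>
    let b' := if c = '"' then !b else b
    (if !b' && pvWs c then [] else [c]) ++ pvGo cs b'

-- structural form of splitOn on separator ['"']
def pvSplit : List Char → List (List Char)
  | [] => [[]]
  | c :: cs => if c = '"' then [] :: pvSplit cs else (pvSplit cs).modifyHead (c :: ·)

-- process one part then join by parity
def pvProc (p : List Char) (b : Bool) : List Char :=
  if b then p else p.filter (fun c => !pvWs c)

def pvProcJoin : List (List Char) → Bool → List Char
  | [], _ => []
  | [p], b => pvProc p b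
  | p :: q :: rest, b => pvProc p b ++ '"' :: pvProcJoin (q :: rest) (!b)

lemma pvSplit_ne_nil (cs : List Char) : pvSplit cs ≠ [] := by
  cases cs with
  | nil => simp [pvSplit]
  | cons c cs =>
    simp only [pvSplit]
    split
    · simp
    · cases h : pvSplit cs with
      | nil => exact absurd h (pvSplit_ne_nil cs)
      | cons p r => simp

lemma pvGo_foldl (cs : List Char) (acc : List Char) (b : Bool) :
    (cs.foldl
      (fun (st : List Char × Bool) c =>
        let in_quotes := if c = '"' then !st.2 else st.2
        if !in_quotes && (c == ' ' || c == '\n' || c == '\t') then (st.1, in_quotes)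
        else (st.1 ++ [c], in_quotes))
      (acc, b)).1 = acc ++ pvGo cs b := by
  induction cs generalizing acc b with
  | nil => simp [pvGo]
  | cons c cs ih =>
    simp only [List.foldl_cons]
    cases h : (!(if c = '"' then !b else b) && (c == ' ' || c == '\n' || c == '\t')) with
    | true =>
      simp only [if_true]
      rw [ih]
      simp [pvGo, pvWs, h]
    | false =>
      simp only [Bool.false_eq_true, if_false]
      rw [ih]
      simp [pvGo, pvWs, h]

lemma pvSplitOn_go (fuel : Nat) (l cur : List Char) (acc : List (List Char))
    (h : l.length ≤ fuel) :
    PySem.Chars.splitOn.go ['"'] fuel l cur acc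
      = acc.reverse ++ (pvSplit l).modifyHead (cur.reverse ++ ·) := by
  induction fuel generalizing l cur acc with
  | zero =>
    interval_cases hl : l.length
    cases l with
    | nil => simp [PySem.Chars.splitOn.go, pvSplit]
    | cons c cs => simp at hl
  | succ fuel ih =>
    cases l with
    | nil => simp [PySem.Chars.splitOn.go, pvSplit]
    | cons c cs =>
      simp only [PySem.Chars.splitOn.go]
      by_cases hc : c = '"'
      · subst hc
        have hpre : (['"'] : List Char).isPrefixOf ('"' :: cs) = true := by simp [List.isPrefixOf]
        rw [if_pos hpre]
        have hdrop : List.drop (['"'] : List Char).length ('"' :: cs) = cs := rfl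
        rw [hdrop]
        simp only [List.length_cons] at h
        rw [ih cs [] ((cur.reverse :: acc)) (by omega)]
        simp only [pvSplit, List.reverse_cons, List.reverse_nil, List.nil_append,
          List.append_assoc, List.singleton_append]
        cases hs : pvSplit cs with
        | nil => exact absurd hs (pvSplit_ne_nil cs)
        | cons p r => simp
      · have hpre : (['"'] : List Char).isPrefixOf (c :: cs) = false := by
          simp only [List.isPrefixOf, Bool.and_eq_false_iff, beq_eq_false_iff_ne, ne_eq]
          exact Or.inl fun h' => hc h'.symm
        rw [if_neg (by simp [hpre])]
        simp only [List.length_cons] at h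
        rw [ih cs (c :: cur) acc (by omega)]
        simp only [pvSplit, if_neg hc, List.modifyHead_modifyHead]
        congr 1
        cases hs : pvSplit cs with
        | nil => exact absurd hs (pvSplit_ne_nil cs)
        | cons p r => simp

lemma pvSplitOn_eq (cs : List Char) :
    PySem.Chars.splitOn cs ['"'] = pvSplit cs := by
  show PySem.Chars.splitOn.go ['"'] (cs.length + 1) cs [] [] = pvSplit cs
  rw [pvSplitOn_go (cs.length + 1) cs [] [] (by omega)]
  cases hs : pvSplit cs with
  | nil => exact absurd hs (pvSplit_ne_nil cs)
  | cons p r => simp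

lemma pvGo_eq_procJoin (cs : List Char) (b : Bool) :
    pvGo cs b = pvProcJoin (pvSplit cs) b := by
  induction cs generalizing b with
  | nil => simp [pvGo, pvSplit, pvProcJoin, pvProc]
  | cons c cs ih =>
    by_cases hc : c = '"'
    · subst hc
      have hw : pvWs '"' = false := by decide
      simp only [pvGo, pvSplit, hw, Bool.and_false, if_neg Bool.false_ne_true]
      cases hs : pvSplit cs with
      | nil => exact absurd hs (pvSplit_ne_nil cs)
      | cons p r =>
        simp only [pvProcJoin, pvProc, if_pos, ih, hs]
        simp
    · simp only [pvGo, pvSplit, if_neg hc, ih]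
      cases hs : pvSplit cs with
      | nil => exact absurd hs (pvSplit_ne_nil cs)
      | cons p r =>
        cases r with
        | nil =>
          cases b <;> simp [pvProcJoin, pvProc, pvWs, List.filter_cons] <;>
            split_ifs <;> simp_all
        | cons q r' =>
          cases b <;> simp [pvProcJoin, pvProc, pvWs, List.filter_cons] <;>
            split_ifs <;> simp_all

lemma pvJoin_enumerate (parts : List (List Char)) (s : Int) (hs : 0 ≤ s) :
    PySem.Chars.join ['"']
      ((PySem.List.enumerate parts s).map
        (fun ip => if PySem.Int.mod ip.1 2 != 0 then ip.2
                   else ip.2.filter (fun c => !(c == ' ' || c == '\n' || c == '\t'))))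
      = pvProcJoin parts (PySem.Int.mod s 2 != 0) := by
  induction parts generalizing s with
  | nil => simp [PySem.List.enumerate_nil, PySem.Chars.join_nil, pvProcJoin]
  | cons p rest ih =>
    cases rest with
    | nil =>
      simp only [PySem.List.enumerate_cons, PySem.List.enumerate_nil, List.map_cons,
        List.map_nil, PySem.Chars.join_singleton, pvProcJoin, pvProc, pvWs]
    | cons q r =>
      simp only [PySem.List.enumerate_cons, List.map_cons]
      rw [PySem.Chars.join_cons_cons]
      have ih' := ih (s + 1) (by omega)
      simp only [PySem.List.enumerate_cons, List.map_cons] at ih'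
      rw [ih']
      have hmod : (PySem.Int.mod (s + 1) 2 != 0) = !(PySem.Int.mod s 2 != 0) := by
        rw [PySem.Int.mod_eq_emod_of_pos (by omega), PySem.Int.mod_eq_emod_of_pos (by omega)]
        rcases Int.emod_two_eq s with h | h <;>
          have h1 : (s + 1) % 2 = 1 - s % 2 := by omega
        all_goals simp [h, h1]
      rw [hmod]
      simp only [pvProcJoin, pvProc, pvWs]
      cases h : (PySem.Int.mod s 2 != 0) <;> simp

-- ===== VERDICT (by name: the statement is the Claim_ definition above) =====
theorem clear_spaces_py_spec : Claim_equal_clear_spaces_py := by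
  intro s _
  unfold Spec_clear_spaces_py clear_spaces_py clear_spaces_py_alt
  simp only
  rw [pvGo_foldl s.toList [] false, pvSplitOn_eq, pvJoin_enumerate _ 0 (by omega),
    pvGo_eq_procJoin]
  rfl
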